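-- pv_equiv track=rewrite | github.com/dsanmar/njdot-chatbot | backend/scripts/ingest_specs.py | _resolve_collection
-- ===== SOURCE A (Python) =====
-- from typing import Any, Dict, List, Optional, Tuple
--
-- def _resolve_collection(target: str, all_configs: list[dict[str, str]]) -> Optional[str]:
--     """
--     Map a target collection name to the canonical collection name used in
--     ``_STATIC_DOCS`` / MP configs.
--
--     Enables versioned destination names like ``"specs_2019_v2"`` to resolve
--     to the ``"specs_2019"`` document set without requiring an exact match.
--
--     Strategy: return the longest canonical name that is a **prefix** of
--     *target*.  Longest-first avoids ``"specs"`` accidentally matching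
--     ``"specs_2019"`` if both existed.
--
--     Returns ``None`` when no canonical collection is a prefix of *target*
--     (i.e. the name is entirely unknown).
--
--     Examples
--     --------
--     >>> _resolve_collection("specs_2019_v2", configs)
--     'specs_2019'
--     >>> _resolve_collection("specs_2019", configs)
--     'specs_2019'
--     >>> _resolve_collection("material_procs_test", configs)
--     'material_procs'
--     """
--     canonical = sorted(
--         {cfg["collection"] for cfg in all_configs},
--         key=len,
--         reverse=True,   # longest first — avoids short-prefix false matches
--     )
--     for base in canonical:
--         if target == base or target.startswith(base + "_"):
--             return base
--     return None
-- ===== SOURCE B (Python) =====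
-- from typing import Optional
--
-- def _resolve_collection(target: str, all_configs: list) -> Optional[str]:
--     best = None
--     for cfg in all_configs:
--         base = cfg["collection"]
--         if (target == base or target.startswith(base + "_")) and (
--             best is None or len(base) > len(best)
--         ):
--             best = base
--     return best
-- ===== Notes on version B (the rewrite author's own statement) =====
-- stated objective: simpler
-- what changed: Single pass over all_configs keeping the longest matching canonical name so far, instead of building a set, sorting it longest-first and returning the first scan hit; correctness relies on the fact that two distinct matching prefixes of target necessarily have different lengths, so the longest match is unique.
import Mathlib
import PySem

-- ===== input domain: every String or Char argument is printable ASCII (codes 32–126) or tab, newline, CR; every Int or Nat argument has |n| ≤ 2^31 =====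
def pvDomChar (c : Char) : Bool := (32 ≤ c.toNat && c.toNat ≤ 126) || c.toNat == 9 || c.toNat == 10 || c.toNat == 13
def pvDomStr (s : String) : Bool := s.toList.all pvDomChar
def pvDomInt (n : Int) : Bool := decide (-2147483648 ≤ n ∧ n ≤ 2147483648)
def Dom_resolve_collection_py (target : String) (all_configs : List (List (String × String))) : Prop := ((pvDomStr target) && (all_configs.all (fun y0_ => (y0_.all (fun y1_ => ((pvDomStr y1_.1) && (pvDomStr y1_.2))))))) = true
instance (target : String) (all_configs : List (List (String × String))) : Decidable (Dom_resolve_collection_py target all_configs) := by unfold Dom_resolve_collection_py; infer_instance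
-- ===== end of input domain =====

-- B replaces A's build-set / sort-longest-first / first-hit scan by a single pass keeping the
-- longest matching canonical name so far (simpler; the longest match is provably unique).


-- ===== PORT A =====
-- target == base or target.startswith(base + "_")  (shared by both programs' loop bodies)
def pvIsMatch (target base : String) : Bool :=
  target == base || PySem.Str.startswith target (base ++ "_")

-- [cfg["collection"] for cfg in all_configs]; none = KeyError (excluded by Pre_)
def pvCollectNames : List (List (String × String)) → Option (List String)
  | [] => some []
  | cfg :: rest =>
    match (PySem.Dict.mk cfg).get? "collection" with
    | none => none
    | some v => (pvCollectNames rest).map (fun ns => v :: ns)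

-- the 'for base in canonical: if …: return base' loop
def pvFirstMatch (target : String) : List String → Option String
  | [] => none
  | base :: rest => if pvIsMatch target base then some base else pvFirstMatch target rest

def resolve_collection_py (target : String) (all_configs : List (List (String × String))) : Option String :=
  match pvCollectNames all_configs with
  | none => none
  | some names =>
    pvFirstMatch target
      (PySem.List.sorted (PySem.Set.ofList names) (fun b => PySem.Str.len b) true)

-- ===== PORT B =====
-- 'best is None or len(base) > len(best)'
def pvBetter (best : Option String) (base : String) : Bool :=
  match best with
  | none => true
  | some b => PySem.Str.len b < PySem.Str.len base

-- B's single for-loop over all_configs; none result mid-list = KeyError (excluded by Pre_)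
def pvBestLoop (target : String) : List (List (String × String)) → Option String → Option String
  | [], best => best
  | cfg :: rest, best =>
    match (PySem.Dict.mk cfg).get? "collection" with
    | none => none
    | some base =>
      pvBestLoop target rest
        (if pvIsMatch target base && pvBetter best base then some base else best)

def resolve_collection_py_alt (target : String) (all_configs : List (List (String × String))) : Option String :=
  pvBestLoop target all_configs none

-- ===== PRECONDITION & SPEC =====
-- Pre_: every config dict has the key "collection"; otherwise cfg["collection"] raises KeyError
-- in A (and in B alike).
def Pre_resolve_collection_py (target : String) (all_configs : List (List (String × String))) : Prop :=
  all_configs.all (fun cfg => (PySem.Dict.mk cfg).contains "collection") = true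

instance (target : String) (all_configs : List (List (String × String))) : Decidable (Pre_resolve_collection_py target all_configs) := by unfold Pre_resolve_collection_py; infer_instance

def pvWitness_resolve_collection_py : String × (List (List (String × String))) :=
  ("specs_2019_v2", [[("collection", "specs_2019")], [("collection", "specs")]])

def Spec_resolve_collection_py (target : String) (all_configs : List (List (String × String))) (out : Option String) : Prop := out = resolve_collection_py_alt target all_configs
instance (target : String) (all_configs : List (List (String × String))) (out : Option String) : Decidable (Spec_resolve_collection_py target all_configs out) := by unfold Spec_resolve_collection_py; infer_instance

-- ===== CLAIM (what is proved, stated in full; the proofs are below) =====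
def Claim_equal_resolve_collection_py : Prop := ∀ (target : String) (all_configs : List (List (String × String))), Dom_resolve_collection_py target all_configs → Pre_resolve_collection_py target all_configs → Spec_resolve_collection_py target all_configs (resolve_collection_py target all_configs)

-- ===== LEMMAS AND PROOFS =====

-- Two distinct matching names have distinct lengths: the longest match is unique.
theorem pvMatch_len_inj (t a b : String)
    (ha : pvIsMatch t a = true) (hb : pvIsMatch t b = true)
    (hlen : PySem.Str.len a = PySem.Str.len b) : a = b := by
  simp only [pvIsMatch, Bool.or_eq_true, beq_iff_eq, PySem.Str.startswith_eq,
    PySem.Chars.startswith_iff] at ha hb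
  simp only [PySem.Str.len_eq, Int.natCast_inj] at hlen
  have happ : ∀ x : String, (x ++ "_").toList = x.toList ++ ['_'] := by
    intro x; simp
  rcases ha with ha | ha
  · rcases hb with hb | hb
    · exact ha.symm.trans hb
    · subst ha
      rw [happ] at hb
      have := hb.length_le
      simp at this hlen
      exfalso; omega
  · rcases hb with hb | hb
    · subst hb
      rw [happ] at ha
      have := ha.length_le
      simp at this hlen
      exfalso; omega
    · rw [happ] at ha hb
      have hlen' : (a.toList ++ ['_']).length = (b.toList ++ ['_']).length := by
        simp [hlen]
      have h1 := List.prefix_iff_eq_take.mp ha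
      have h2 := List.prefix_iff_eq_take.mp hb
      rw [hlen'] at h1
      have : a.toList ++ ['_'] = b.toList ++ ['_'] := h1.trans h2.symm
      exact String.toList_inj.mp (List.append_inj_left this (by simp [hlen]))

-- pvFirstMatch finds nothing iff nothing matches
theorem pvFirstMatch_none (t : String) (c : List String)
    (h : pvFirstMatch t c = none) : ∀ x ∈ c, pvIsMatch t x = false := by
  induction c with
  | nil => intro x hx; cases hx
  | cons a rest ih =>
    intro x hx
    by_cases hm : pvIsMatch t a = true
    · simp [pvFirstMatch, hm] at h
    · simp only [pvFirstMatch, Bool.not_eq_true] at h hm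
      rw [hm] at h
      simp at h
      rcases List.mem_cons.mp hx with hx | hx
      · subst hx; exact hm
      · exact ih h x hx

-- On a length-descending list, the first match is a longest match.
theorem pvFirstMatch_some (t : String) (c : List String) (m : String)
    (hp : c.Pairwise (fun a b => PySem.Str.len b ≤ PySem.Str.len a))
    (h : pvFirstMatch t c = some m) :
    pvIsMatch t m = true ∧ m ∈ c ∧
      ∀ x ∈ c, pvIsMatch t x = true → PySem.Str.len x ≤ PySem.Str.len m := by
  induction c with
  | nil => cases h
  | cons a rest ih =>
    rw [List.pairwise_cons] at hp
    by_cases hm : pvIsMatch t a = true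
    · simp only [pvFirstMatch, hm, if_pos] at h
      cases h
      refine ⟨hm, List.mem_cons_self, ?_⟩
      intro x hx _
      rcases List.mem_cons.mp hx with hx | hx
      · subst hx; exact le_refl _
      · exact hp.1 x hx
    · simp only [pvFirstMatch, hm, if_neg, Bool.not_eq_true] at h
      obtain ⟨h1, h2, h3⟩ := ih hp.2 h
      refine ⟨h1, List.mem_cons_of_mem _ h2, ?_⟩
      intro x hx hmx
      rcases List.mem_cons.mp hx with hx | hx
      · subst hx; exact absurd hmx (by simp [hm])
      · exact h3 x hx hmx

-- B's loop, re-expressed over the extracted name list (valid when no KeyError occurs)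
def pvBestNames (t : String) : List String → Option String → Option String
  | [], best => best
  | n :: rest, best =>
    pvBestNames t rest (if pvIsMatch t n && pvBetter best n then some n else best)

theorem pvBestLoop_eq_bestNames (t : String) (cfgs : List (List (String × String)))
    (ns : List String) (best : Option String)
    (h : pvCollectNames cfgs = some ns) :
    pvBestLoop t cfgs best = pvBestNames t ns best := by
  induction cfgs generalizing ns best with
  | nil =>
    simp [pvCollectNames] at h
    subst h; rfl
  | cons cfg rest ih =>
    simp only [pvCollectNames] at h
    cases hg : (PySem.Dict.mk cfg).get? "collection" with
    | none => rw [hg] at h; cases h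
    | some v =>
      rw [hg] at h
      cases hr : pvCollectNames rest with
      | none => rw [hr] at h; cases h
      | some ns' =>
        rw [hr] at h
        simp at h
        subst h
        simp only [pvBestLoop, hg, pvBestNames]
        exact ih _ _ hr

-- Invariant of B's fold: the result is a match of maximal length.
theorem pvBestNames_spec (t : String) (ns : List String) (best : Option String)
    (hb : ∀ b, best = some b → pvIsMatch t b = true) :
    (pvBestNames t ns best = none → best = none ∧ ∀ x ∈ ns, pvIsMatch t x = false) ∧
    (∀ m, pvBestNames t ns best = some m → pvIsMatch t m = true ∧
      (best = some m ∨ m ∈ ns) ∧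
      (∀ x ∈ ns, pvIsMatch t x = true → PySem.Str.len x ≤ PySem.Str.len m) ∧
      (∀ b, best = some b → PySem.Str.len b ≤ PySem.Str.len m)) := by
  induction ns generalizing best with
  | nil =>
    refine ⟨fun h => ⟨h, by simp⟩, fun m h => ?_⟩
    refine ⟨hb m h, Or.inl h, by simp, ?_⟩
    intro b hbb
    rw [hbb] at h; cases h
    exact le_refl _
  | cons n rest ih =>
    by_cases hc : (pvIsMatch t n && pvBetter best n) = true
    · -- best updates to n
      have hb' : ∀ b, (some n : Option String) = some b → pvIsMatch t b = true := by
        intro b hbb; cases hbb; exact (Bool.and_eq_true ..).mp hc |>.1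
      obtain ⟨ihn, ihs⟩ := ih (some n) hb'
      constructor
      · intro h
        simp only [pvBestNames, hc, if_pos] at h
        exact absurd (ihn h).1 (by simp)
      · intro m h
        simp only [pvBestNames, hc, if_pos] at h
        obtain ⟨h1, h2, h3, h4⟩ := ihs m h
        have hnm : PySem.Str.len n ≤ PySem.Str.len m := h4 n rfl
        refine ⟨h1, ?_, ?_, ?_⟩
        · rcases h2 with h2 | h2
          · cases h2; exact Or.inr List.mem_cons_self
          · exact Or.inr (List.mem_cons_of_mem _ h2)
        · intro x hx hmx
          rcases List.mem_cons.mp hx with hx | hx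
          · subst hx; exact hnm
          · exact h3 x hx hmx
        · intro b hbb
          have h5 := (Bool.and_eq_true ..).mp hc |>.2
          rw [hbb] at h5
          simp only [pvBetter] at h5
          have : PySem.Str.len b < PySem.Str.len n := by exact_mod_cast of_decide_eq_true h5
          exact le_of_lt (lt_of_lt_of_le this hnm)
    · -- best unchanged
      obtain ⟨ihn, ihs⟩ := ih best hb
      constructor
      · intro h
        simp only [pvBestNames, hc] at h
        obtain ⟨hbn, hrest⟩ := ihn h
        refine ⟨hbn, ?_⟩
        intro x hx
        rcases List.mem_cons.mp hx with hx | hx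
        · subst hx
          by_contra hmx
          simp only [Bool.not_eq_false] at hmx
          rw [hbn] at hc
          simp [pvBetter, hmx] at hc
        · exact hrest x hx
      · intro m h
        simp only [pvBestNames, hc] at h
        obtain ⟨h1, h2, h3, h4⟩ := ihs m h
        refine ⟨h1, ?_, ?_, h4⟩
        · rcases h2 with h2 | h2
          · exact Or.inl h2
          · exact Or.inr (List.mem_cons_of_mem _ h2)
        · intro x hx hmx
          rcases List.mem_cons.mp hx with hx | hx
          · subst hx
            rw [hmx] at hc
            simp only [Bool.true_and] at hc
            cases hbv : best with
            | none => rw [hbv] at hc; simp [pvBetter] at hc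
            | some b =>
              rw [hbv] at hc
              simp only [pvBetter] at hc
              have hxb : ¬ PySem.Str.len b < PySem.Str.len x := by
                intro hlt
                exact hc (decide_eq_true hlt)
              exact le_trans (not_lt.mp hxb) (h4 b hbv)
          · exact h3 x hx hmx

-- Pre_ guarantees the name extraction succeeds
theorem pvCollectNames_isSome (cfgs : List (List (String × String)))
    (h : cfgs.all (fun cfg => (PySem.Dict.mk cfg).contains "collection") = true) :
    ∃ ns, pvCollectNames cfgs = some ns := by
  induction cfgs with
  | nil => exact ⟨[], rfl⟩
  | cons cfg rest ih =>
    simp only [List.all_cons, Bool.and_eq_true] at h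
    obtain ⟨ns, hns⟩ := ih h.2
    have : ((PySem.Dict.mk cfg).get? "collection").isSome = true := by
      rw [← PySem.Dict.contains_eq_isSome_get?]; exact h.1
    cases hg : (PySem.Dict.mk cfg).get? "collection" with
    | none => rw [hg] at this; cases this
    | some v => exact ⟨v :: ns, by simp [pvCollectNames, hg, hns]⟩

-- ===== VERDICT (by name: the statement is the Claim_ definition above) =====
theorem resolve_collection_py_spec : Claim_equal_resolve_collection_py := by
  intro target all_configs _ hpre
  unfold Spec_resolve_collection_py resolve_collection_py resolve_collection_py_alt
  obtain ⟨ns, hns⟩ := pvCollectNames_isSome all_configs hpre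
  rw [hns, pvBestLoop_eq_bestNames target all_configs ns none hns]
  show pvFirstMatch target (PySem.List.sorted (PySem.Set.ofList ns) (fun b => PySem.Str.len b) true) = pvBestNames target ns none
  set c := PySem.List.sorted (PySem.Set.ofList ns) (fun b => PySem.Str.len b) true with hc
  have hmemc : ∀ x, x ∈ c ↔ x ∈ ns := by
    intro x
    rw [hc, PySem.List.mem_sorted]
    exact PySem.Set.mem_ofList ns x
  have hp : c.Pairwise (fun a b => PySem.Str.len b ≤ PySem.Str.len a) :=
    PySem.List.sorted_pairwise_rev _ _
  obtain ⟨hBn, hBs⟩ := pvBestNames_spec target ns none (by intro b h; cases h)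
  cases hA : pvFirstMatch target c with
  | none =>
    have hno := pvFirstMatch_none target c hA
    cases hB : pvBestNames target ns none with
    | none => rfl
    | some m =>
      obtain ⟨h1, h2, _, _⟩ := hBs m hB
      rcases h2 with h2 | h2
      · cases h2
      · exact absurd h1 (by simp [hno m ((hmemc m).mpr h2)])
  | some m1 =>
    obtain ⟨ha1, ha2, ha3⟩ := pvFirstMatch_some target c m1 hp hA
    cases hB : pvBestNames target ns none with
    | none =>
      obtain ⟨_, hno⟩ := hBn hB
      exact absurd ha1 (by simp [hno m1 ((hmemc m1).mp ha2)])
    | some m2 =>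
      obtain ⟨hb1, hb2, hb3, _⟩ := hBs m2 hB
      rcases hb2 with hb2 | hb2
      · cases hb2
      have hle1 : PySem.Str.len m2 ≤ PySem.Str.len m1 := ha3 m2 ((hmemc m2).mpr hb2) hb1
      have hle2 : PySem.Str.len m1 ≤ PySem.Str.len m2 := hb3 m1 ((hmemc m1).mp ha2) ha1
      exact congrArg some (pvMatch_len_inj target m1 m2 ha1 hb1 (le_antisymm hle2 hle1))
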